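-- pv_equiv track=rewrite | github.com/DanielQuintero223/backup_pc | Estructura De Datos 2/Taller #2/recursionPractice.py | digPar
-- ===== SOURCE A (Python) =====
-- def digPar(num):
--     # caso base
--     if num == 0:
--         return 0
--     else:
--         # si la division consecutiva del numero entre 2 da 0 es porque el numero es par
--         if num % 2 == 0:
--             return 1 + (digPar(num // 10))
--         else:
--             # si no se da el caso de arriba entonces solo quito el ultimo digito
--             return (digPar(num // 10))
-- ===== SOURCE B (Python) =====
-- def digPar(num):
--     digits = []
--     while num != 0:
--         digits.append(num % 10)
--         num //= 10
--     return sum(1 for d in digits if d % 2 == 0)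
-- ===== Notes on version B (the rewrite author's own statement) =====
-- stated objective: alternative
-- what changed: Instead of A's recursion that tests the parity of the shrinking number itself, B first extracts the list of digits with a while loop and then counts the even digits in a separate pass over that list.
import Mathlib
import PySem

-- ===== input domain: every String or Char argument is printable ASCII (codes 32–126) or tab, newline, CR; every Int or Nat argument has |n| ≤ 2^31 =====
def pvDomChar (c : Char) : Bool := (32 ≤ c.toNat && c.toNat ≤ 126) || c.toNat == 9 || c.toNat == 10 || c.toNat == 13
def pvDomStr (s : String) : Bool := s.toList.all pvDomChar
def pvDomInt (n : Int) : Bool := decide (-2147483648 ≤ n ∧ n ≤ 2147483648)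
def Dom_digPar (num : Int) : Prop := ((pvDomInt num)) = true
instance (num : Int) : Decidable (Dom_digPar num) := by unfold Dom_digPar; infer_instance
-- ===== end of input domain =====

-- B extracts the digit list first and counts even digits in a second pass, instead of A's recursion on the shrinking number (alternative decomposition; same cost).


-- ===== PORT A =====
-- A's recursion, with a fuel guard only for totality (Python diverges on num < 0; those inputs are outside Pre_).
def digParFuel : Nat → Int → Int
  | 0, _ => 0
  | f + 1, num =>
    if num = 0 then 0
    else if PySem.Int.mod num 2 = 0 then 1 + digParFuel f (PySem.Int.floordiv num 10)
    else digParFuel f (PySem.Int.floordiv num 10)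

def digPar (num : Int) : Int := digParFuel (num.toNat + 1) num

-- ===== PORT B =====
-- B's first pass: the while loop that collects the digits (fuel only for totality).
def pvDigits : Nat → Int → List Int
  | 0, _ => []
  | f + 1, num =>
    if num = 0 then []
    else PySem.Int.mod num 10 :: pvDigits f (PySem.Int.floordiv num 10)

-- B's second pass: sum(1 for d in digits if d % 2 == 0).
def digPar_alt (num : Int) : Int :=
  ((pvDigits (num.toNat + 1) num).filter (fun d => PySem.Int.mod d 2 = 0)).length

-- ===== PRECONDITION & SPEC =====
-- Pre_ excludes negative inputs: there Python A raises RecursionError (and B's loop never terminates).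
def Pre_digPar (num : Int) : Prop := 0 ≤ num
instance (num : Int) : Decidable (Pre_digPar num) := by unfold Pre_digPar; infer_instance
def pvWitness_digPar : Int := (2468)

def Spec_digPar (num : Int) (out : Int) : Prop := out = digPar_alt num
instance (num : Int) (out : Int) : Decidable (Spec_digPar num out) := by unfold Spec_digPar; infer_instance

-- ===== CLAIM (what is proved, stated in full; the proofs are below) =====
def Claim_equal_digPar : Prop := ∀ (num : Int), Dom_digPar num → Pre_digPar num → Spec_digPar num (digPar num)

-- ===== LEMMAS AND PROOFS =====

theorem floordiv_ten_facts (num : Int) (h0 : 0 ≤ num) (hne : num ≠ 0) :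
    (PySem.Int.floordiv num 10).toNat < num.toNat ∧ 0 ≤ PySem.Int.floordiv num 10 := by
  rw [PySem.Int.floordiv_eq_ediv_of_pos (show (0:Int) < 10 by omega)]
  omega

-- the last digit of a non-negative number has the number's parity
theorem mod_ten_parity (num : Int) (h0 : 0 ≤ num) :
    PySem.Int.mod (PySem.Int.mod num 10) 2 = PySem.Int.mod num 2 := by
  rw [PySem.Int.mod_eq_emod_of_pos (show (0:Int) < 2 by omega),
      PySem.Int.mod_eq_emod_of_pos (show (0:Int) < 2 by omega),
      PySem.Int.mod_eq_emod_of_pos (show (0:Int) < 10 by omega)]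
  omega

theorem countEven_digits_eq (f : Nat) (num : Int) (h0 : 0 ≤ num) :
    (((pvDigits f num).filter (fun d => PySem.Int.mod d 2 = 0)).length : Int)
      = digParFuel f num := by
  induction f generalizing num with
  | zero => simp [pvDigits, digParFuel]
  | succ f ih =>
    simp only [pvDigits, digParFuel]
    by_cases hz : num = 0
    · simp [hz]
    · obtain ⟨_, hpos⟩ := floordiv_ten_facts num h0 hz
      by_cases he : PySem.Int.mod num 2 = 0
      · simp only [hz, if_false, List.filter_cons, mod_ten_parity num h0, he,
          decide_true, if_true, List.length_cons]
        rw [← ih _ hpos]; push_cast; ring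
      · simp only [hz, if_false, List.filter_cons, mod_ten_parity num h0, he,
          decide_false, if_false]
        exact ih _ hpos

-- ===== VERDICT (by name: the statement is the Claim_ definition above) =====
theorem digPar_spec : Claim_equal_digPar := by
  intro num _ hpre
  unfold Spec_digPar digPar digPar_alt
  exact (countEven_digits_eq _ _ hpre).symm
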